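-- pv_equiv track=rewrite | github.com/timwiddo/Python-Tasks | Task 7 Zombie Solution.py | christmasFated
-- ===== SOURCE A (Python) =====
-- def christmasFated(positions):
--     # Zähle die verschiedenen Typen von Figuren
--     count_z = sum(1 for fig, _ in positions if fig == 'Z')
--     count_zh = sum(1 for fig, _ in positions if fig == 'ZH')
--     count_other = sum(1 for fig, _ in positions if fig not in ['Z', 'ZH'])
--
--     # Überprüfe die Bedingungen
--     if count_other == 0: # nur noch Z oder ZH
--         return True
--     elif count_z == 0 and count_other >= 1: # keine zombies Z nur H oder HH
--         return True
--     else: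
--         return False
-- ===== SOURCE B (Python) =====
-- def christmasFated(positions):
--     has_z = False
--     has_other = False
--     for fig, _ in positions:
--         if fig == 'Z':
--             has_z = True
--         if fig != 'Z' and fig != 'ZH':
--             has_other = True
--     return not (has_z and has_other)
-- ===== Notes on version B (the rewrite author's own statement) =====
-- stated objective: simpler
-- what changed: Replaces three counting passes plus a three-branch if/elif/else by a single pass maintaining two booleans (any 'Z', any non-Z/ZH) and returning not (has_z and has_other), the logical simplification of A's condition.
import Mathlib
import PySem

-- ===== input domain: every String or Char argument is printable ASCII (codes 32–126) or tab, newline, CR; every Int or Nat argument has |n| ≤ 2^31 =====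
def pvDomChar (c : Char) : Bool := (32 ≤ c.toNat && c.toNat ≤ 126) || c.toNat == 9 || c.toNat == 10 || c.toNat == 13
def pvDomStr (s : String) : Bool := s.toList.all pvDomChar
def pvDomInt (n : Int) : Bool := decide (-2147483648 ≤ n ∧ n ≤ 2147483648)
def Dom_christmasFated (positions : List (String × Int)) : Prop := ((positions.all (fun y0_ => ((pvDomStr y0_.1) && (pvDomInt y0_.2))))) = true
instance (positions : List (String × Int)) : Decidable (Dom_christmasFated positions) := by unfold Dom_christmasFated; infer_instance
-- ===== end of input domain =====

-- B replaces A's three counting passes and if/elif/else by one pass over two booleans; objective: simpler.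

-- ===== PORT A =====
def christmasFated (positions : List (String × Int)) : Bool :=
  let count_z : Int := positions.foldl (fun acc p => if p.1 == "Z" then acc + 1 else acc) 0
  let _count_zh : Int := positions.foldl (fun acc p => if p.1 == "ZH" then acc + 1 else acc) 0
  let count_other : Int := positions.foldl (fun acc p => if !(p.1 == "Z" || p.1 == "ZH") then acc + 1 else acc) 0
  if count_other = 0 then true
  else if count_z = 0 ∧ 1 ≤ count_other then true
  else false

-- ===== PORT B =====
def christmasFated_alt (positions : List (String × Int)) : Bool :=
  let st := positions.foldl (fun (st : Bool × Bool) p =>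
    let hz := if p.1 == "Z" then true else st.1
    let ho := if p.1 != "Z" && p.1 != "ZH" then true else st.2
    (hz, ho)) (false, false)
  !(st.1 && st.2)

-- ===== PRECONDITION & SPEC =====
def Spec_christmasFated (positions : List (String × Int)) (out : Bool) : Prop := out = christmasFated_alt positions
instance (positions : List (String × Int)) (out : Bool) : Decidable (Spec_christmasFated positions out) := by unfold Spec_christmasFated; infer_instance

-- ===== CLAIM (what is proved, stated in full; the proofs are below) =====
def Claim_equal_christmasFated : Prop := ∀ (positions : List (String × Int)), Dom_christmasFated positions → Spec_christmasFated positions (christmasFated positions)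

-- ===== LEMMAS AND PROOFS =====

-- B's flag loop computes (hz0 || any "Z", ho0 || any other)
theorem altFoldl_flags (l : List (String × Int)) (hz ho : Bool) :
    l.foldl (fun (st : Bool × Bool) p =>
      let hz := if p.1 == "Z" then true else st.1
      let ho := if p.1 != "Z" && p.1 != "ZH" then true else st.2
      (hz, ho)) (hz, ho)
    = (hz || l.any (fun p => p.1 == "Z"),
       ho || l.any (fun p => !(p.1 == "Z" || p.1 == "ZH"))) := by
  induction l generalizing hz ho with
  | nil => simp
  | cons x xs ih =>
    simp only [List.foldl_cons, List.any_cons, ih]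
    by_cases hx : x.1 = "Z"
    · simp [hx]
    · have e1 : (x.1 == "Z") = false := by simp [hx]
      by_cases hx2 : x.1 = "ZH"
      · simp [hx2]
      · have e2 : (x.1 == "ZH") = false := by simp [hx2]
        simp [e1, e2, Bool.or_assoc]
        exact Or.inl ⟨hx, hx2⟩

theorem countP_zero_of_any_false {q : (String × Int) → Bool} {l : List (String × Int)}
    (h : l.any q = false) : List.countP q l = 0 :=
  List.countP_eq_zero.mpr (fun a ha => by simpa using List.any_eq_false.mp h a ha)

theorem countP_pos_of_any_true {q : (String × Int) → Bool} {l : List (String × Int)}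
    (h : l.any q = true) : 0 < List.countP q l :=
  List.countP_pos_iff.mpr (by simpa using List.any_eq_true.mp h)

-- ===== VERDICT (by name: the statement is the Claim_ definition above) =====
theorem christmasFated_spec : Claim_equal_christmasFated := by
  intro positions _
  show christmasFated positions = christmasFated_alt positions
  unfold christmasFated christmasFated_alt
  rw [PySem.List.foldl_count_if, PySem.List.foldl_count_if, PySem.List.foldl_count_if,
    altFoldl_flags]
  simp only [zero_add, Bool.false_or]
  rcases h1 : positions.any (fun p => p.1 == "Z") <;>
    rcases h2 : positions.any (fun p => !(p.1 == "Z" || p.1 == "ZH"))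
  · rw [countP_zero_of_any_false h2]; simp
  · have hco := countP_pos_of_any_true h2
    rw [countP_zero_of_any_false h1]
    rw [if_neg (by exact_mod_cast hco.ne'), if_pos ⟨by simp, by exact_mod_cast hco⟩]
    simp
  · rw [countP_zero_of_any_false h2]; simp
  · have hco := countP_pos_of_any_true h2
    have hcz := countP_pos_of_any_true h1
    rw [if_neg (by exact_mod_cast hco.ne'),
      if_neg (fun h => absurd h.1 (by exact_mod_cast hcz.ne'))]
    simp
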